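-- pv_equiv track=rewrite | github.com/zero0205/Algorithm_Python | 코테/2022 라인 플러스/4.py | solution
-- ===== SOURCE A (Python) =====
-- def solution(arr, brr):
--     answer = 0
--     for idx in range(len(arr) - 1):
--         if arr[idx] == brr[idx]:
--             continue
--         elif arr[idx] > brr[idx]:
--             arr[idx + 1] += (arr[idx] - brr[idx])
--             arr[idx] = brr[idx]
--             answer += 1
--         else:
--             arr[idx + 1] -= (brr[idx] - arr[idx])
--             arr[idx] = brr[idx]
--             answer += 1
--     return answer
-- ===== SOURCE B (Python) =====
-- def solution(arr, brr):
--     # Equivalent count: position idx mismatches (after A's forward propagation)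
--     # exactly when the prefix sums of arr and brr through idx differ.
--     # Note: unlike A, this does not mutate arr; equivalence is about the return value.
--     sa = sb = answer = 0
--     for a, b in zip(arr[:-1], brr):
--         sa += a
--         sb += b
--         if sa != sb:
--             answer += 1
--     return answer
-- ===== Notes on version B (the rewrite author's own statement) =====
-- stated objective: simpler
-- what changed: Replaces the in-place look-ahead propagation (write the difference into arr[idx+1], overwrite arr[idx]) with a pure prefix-sum comparison: count positions where the running sums of arr and brr differ; no mutation, no indexed writes, one zip loop.
import Mathlib
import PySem

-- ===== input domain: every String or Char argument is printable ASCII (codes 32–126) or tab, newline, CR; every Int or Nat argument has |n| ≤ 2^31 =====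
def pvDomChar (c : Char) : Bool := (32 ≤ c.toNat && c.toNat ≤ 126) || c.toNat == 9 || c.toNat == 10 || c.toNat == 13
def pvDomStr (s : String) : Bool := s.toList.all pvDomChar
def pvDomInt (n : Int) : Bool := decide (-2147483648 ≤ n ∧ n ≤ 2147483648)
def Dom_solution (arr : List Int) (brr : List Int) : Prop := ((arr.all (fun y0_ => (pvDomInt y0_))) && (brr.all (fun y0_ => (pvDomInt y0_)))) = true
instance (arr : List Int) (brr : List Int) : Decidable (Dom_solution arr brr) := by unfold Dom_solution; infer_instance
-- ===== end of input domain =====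

-- B replaces A's in-place look-ahead propagation by a pure prefix-sum comparison (simpler, no
-- mutation). A mutates arr in place; B does not — the equivalence proved is about the RETURN value only.

-- ===== PORT A =====
-- the body of A's for-loop, verbatim: compare arr[idx] with brr[idx], push the difference into
-- arr[idx+1], overwrite arr[idx], bump answer
def solutionStep (brr : List Int) (st : List Int × Int) (idx : Int) : List Int × Int :=
  let a := st.1
  let ai := PySem.List.pyGetD a idx 0
  let bi := PySem.List.pyGetD brr idx 0
  if ai = bi then st
  else if ai > bi then
    let a1 := a.set (idx + 1).toNat (PySem.List.pyGetD a (idx + 1) 0 + (ai - bi))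
    let a2 := a1.set idx.toNat bi
    (a2, st.2 + 1)
  else
    let a1 := a.set (idx + 1).toNat (PySem.List.pyGetD a (idx + 1) 0 - (bi - ai))
    let a2 := a1.set idx.toNat bi
    (a2, st.2 + 1)

-- literal transliteration: fold the loop body over range(len(arr) - 1) carrying (mutable list, answer)
def solution (arr : List Int) (brr : List Int) : Int :=
  ((PySem.List.pyRange 0 ((arr.length : Int) - 1) 1).foldl (solutionStep brr) (arr, 0)).2

-- ===== PORT B =====
-- the body of Source B's loop, verbatim: advance both running sums, count when they differ
def solutionAltStep (st : Int × Int × Int) (p : Int × Int) : Int × Int × Int :=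
  let sa := st.1 + p.1
  let sb := st.2.1 + p.2
  (sa, sb, if sa ≠ sb then st.2.2 + 1 else st.2.2)

-- literal transliteration of Source B: zip(arr[:-1], brr), running sums sa/sb, count sa ≠ sb
def solution_alt (arr : List Int) (brr : List Int) : Int :=
  ((arr.dropLast.zip brr).foldl solutionAltStep (0, 0, 0)).2.2

-- ===== PRECONDITION & SPEC =====
-- Pre_ excludes exactly the inputs where A raises IndexError (brr shorter than len(arr) - 1).
def Pre_solution (arr : List Int) (brr : List Int) : Prop := arr.length ≤ brr.length + 1
instance (arr : List Int) (brr : List Int) : Decidable (Pre_solution arr brr) := by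
  unfold Pre_solution; infer_instance
def pvWitness_solution : List Int × List Int := ([1, 2, 3], [2, 1, 3])

def Spec_solution (arr : List Int) (brr : List Int) (out : Int) : Prop := out = solution_alt arr brr
instance (arr : List Int) (brr : List Int) (out : Int) : Decidable (Spec_solution arr brr out) := by
  unfold Spec_solution; infer_instance

-- ===== CLAIM (what is proved, stated in full; the proofs are below) =====
def Claim_equal_solution : Prop := ∀ (arr : List Int) (brr : List Int), Dom_solution arr brr → Pre_solution arr brr → Spec_solution arr brr (solution arr brr)

-- ===== LEMMAS AND PROOFS =====

-- carry-style count: v is the propagated current value, R the untouched tail of arr, ys the rest of brr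
def cntv : Int → List Int → List Int → Int
  | _, [], _ => 0
  | _, _, [] => 0
  | v, r :: R, y :: ys => (if v = y then 0 else 1) + cntv (v - y + r) R ys

-- prefix-sum-style count used by B: carry c = sa - sb before the step
def cnt : Int → List Int → List Int → Int
  | _, [], _ => 0
  | _, _, [] => 0
  | c, x :: xs, y :: ys => (if c + x = y then 0 else 1) + cnt (c + x - y) xs ys

lemma cnt_dropLast (rest ys : List Int) (x c : Int) :
    cnt c ((x :: rest).dropLast) ys = cntv (c + x) rest ys := by
  induction rest generalizing x c ys with
  | nil => cases ys <;> simp [cnt, cntv]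
  | cons r rest ih =>
    cases ys with
    | nil => simp [cnt, cntv]
    | cons y ys =>
      simp only [List.dropLast_cons₂, cnt, cntv, ih]

lemma B_loop (xs ys : List Int) (sa sb ans : Int) :
    ((xs.zip ys).foldl solutionAltStep (sa, sb, ans)).2.2 = ans + cnt (sa - sb) xs ys := by
  induction xs generalizing ys sa sb ans with
  | nil => simp [cnt]
  | cons x xs ih =>
    cases ys with
    | nil => simp [cnt]
    | cons y ys =>
      simp only [List.zip_cons_cons, List.foldl_cons, solutionAltStep, cnt, ih]
      have h : sa + x - (sb + y) = sa - sb + x - y := by ring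
      rw [h]
      by_cases hc : sa - sb + x = y
      · simp [hc]
        omega
      · have hne : ¬ (sa + x = sb + y) := by omega
        simp [hc, hne]
        omega

lemma getD_app (P R : List Int) (v d : Int) : (P ++ v :: R).getD P.length d = v := by simp

lemma getD_app1 (P R : List Int) (v r d : Int) : (P ++ v :: r :: R).getD (P.length + 1) d = r := by
  simp

lemma set_app (P R : List Int) (v y : Int) : (P ++ v :: R).set P.length y = P ++ y :: R := by simp

lemma set_app1 (P R : List Int) (v r y : Int) :
    (P ++ v :: r :: R).set (P.length + 1) y = P ++ v :: y :: R := by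
  simp

lemma A_loop (brr : List Int) :
    ∀ (m k : Nat) (P R : List Int) (v ans : Int),
      P.length = k → R.length = m → k + m ≤ brr.length →
      (((PySem.List.pyRange (k : Int) ((k : Int) + (m : Int)) 1).foldl (solutionStep brr)
        (P ++ v :: R, ans)).2)
      = ans + cntv v R (brr.drop k) := by
  intro m
  induction m with
  | zero =>
    intro k P R v ans hP hR hlen
    have hnil : PySem.List.pyRange (k : Int) ((k : Int) + ((0 : Nat) : Int)) 1 = [] :=
      PySem.List.pyRange_one_eq_nil (by push_cast; omega)
    rw [hnil]
    have hR0 : R = [] := List.length_eq_zero_iff.mp hR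
    subst hR0
    simp [cntv]
  | succ m ih =>
    intro k P R v ans hP hR hlen
    subst hP
    obtain ⟨r, R', rfl⟩ : ∃ r R', R = r :: R' := by
      cases R with
      | nil => simp at hR
      | cons a b => exact ⟨a, b, rfl⟩
    have hR' : R'.length = m := by simpa using hR
    have hk : P.length < brr.length := by omega
    have hbr : brr.getD P.length 0 = brr[P.length] := List.getD_eq_getElem brr 0 hk
    have hcons : PySem.List.pyRange (P.length : Int) ((P.length : Int) + ((m + 1 : Nat) : Int)) 1
        = (P.length : Int) :: PySem.List.pyRange ((P.length : Int) + 1) ((P.length : Int) + ((m + 1 : Nat) : Int)) 1 :=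
      PySem.List.pyRange_one_cons (by push_cast; omega)
    rw [hcons, List.foldl_cons]
    have hcast1 : ((P.length : Int) + 1) = ((P.length + 1 : Nat) : Int) := by push_cast; ring
    have harg2 : ((P.length : Int) + ((m + 1 : Nat) : Int)) = ((P.length + 1 : Nat) : Int) + ((m : Nat) : Int) := by
      push_cast; ring
    rw [List.drop_eq_getElem_cons hk]
    simp only [solutionStep, hcast1, harg2, PySem.List.pyGetD_natCast, Int.toNat_natCast,
      getD_app, getD_app1, hbr, set_app, set_app1]
    by_cases hvy : v = brr[P.length]
    · rw [if_pos hvy]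
      have hL : P ++ v :: r :: R' = (P ++ [v]) ++ r :: R' := by simp
      rw [hL, ih (P.length + 1) (P ++ [v]) R' r ans (by simp) hR' (by omega)]
      simp only [cntv, if_pos hvy]
      rw [hvy]
      simp
    · rw [if_neg hvy]
      by_cases hgt : v > brr[P.length]
      · rw [if_pos hgt]
        have hL : P ++ brr[P.length] :: (r + (v - brr[P.length])) :: R'
            = (P ++ [brr[P.length]]) ++ (r + (v - brr[P.length])) :: R' := by simp
        rw [hL, ih (P.length + 1) (P ++ [brr[P.length]]) R' (r + (v - brr[P.length])) (ans + 1)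
          (by simp) hR' (by omega)]
        simp only [cntv, if_neg hvy]
        rw [show r + (v - brr[P.length]) = v - brr[P.length] + r from by ring]
        ring
      · rw [if_neg hgt]
        have hL : P ++ brr[P.length] :: (r - (brr[P.length] - v)) :: R'
            = (P ++ [brr[P.length]]) ++ (r - (brr[P.length] - v)) :: R' := by simp
        rw [hL, ih (P.length + 1) (P ++ [brr[P.length]]) R' (r - (brr[P.length] - v)) (ans + 1)
          (by simp) hR' (by omega)]
        simp only [cntv, if_neg hvy]
        rw [show r - (brr[P.length] - v) = v - brr[P.length] + r from by ring]
        ring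

-- ===== VERDICT (by name: the statement is the Claim_ definition above) =====
theorem solution_spec : Claim_equal_solution := by
  intro arr brr hdom hpre
  unfold Spec_solution
  cases arr with
  | nil =>
    unfold solution solution_alt
    rw [PySem.List.pyRange_one_eq_nil (by norm_num)]
    simp
  | cons x rest =>
    unfold Pre_solution at hpre
    unfold solution solution_alt
    have hA := A_loop brr rest.length 0 [] rest x 0 rfl rfl (by simp at hpre ⊢; omega)
    simp only [List.nil_append, Nat.cast_zero, List.drop_zero, zero_add] at hA
    have hb : (((x :: rest).length : Int)) - 1 = ((rest.length : Nat) : Int) := by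
      push_cast [List.length_cons]; ring
    rw [hb, hA, B_loop, cnt_dropLast]
    simp
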